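-- pv_equiv track=rewrite | github.com/TheSpecialOne-web/dijkstra_algorithm | dijkstra_algorithm/algorithm.py | solve
-- ===== SOURCE A (Python) =====
-- import heapq
--
-- def can_reach(start, N, fuel_max, graph, gas_stations):
--     dist = [float('inf')] * N  # Distance de chaque ville initialisée à l'infini
--     dist[start] = 0  # La distance de la ville de départ est 0
--     pq = [(0, start)]  # File de priorité pour l'algorithme de Dijkstra
--
--     while pq:
--         fuel_used, node = heapq.heappop(pq)  # On prend la ville avec le moins de carburant utilisé
--
--         # Si on est dans une station-service, on remet le carburant à 0
--         if gas_stations[node] == 1: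
--             fuel_used = 0
--
--         # On explore les voisins de la ville courante
--         for neighbor, dist_to_neighbor in graph[node]:
--             new_fuel_used = fuel_used + dist_to_neighbor
--
--             # On ne considère que les trajets où le carburant utilisé ne dépasse pas la limite
--             if new_fuel_used <= fuel_max and new_fuel_used < dist[neighbor]:
--                 dist[neighbor] = new_fuel_used
--                 heapq.heappush(pq, (new_fuel_used, neighbor))
--
--     return dist
--
-- def solve(N, M, L, gas_stations, roads):
--     graph = [[] for _ in range(N)]  # Initialisation du graphe
--
--     # Construction du graphe à partir des routes
--     for u, v, d in roads:
--         graph[u-1].append((v-1, d))  # Route bidirectionnelle entre u et v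
--         graph[v-1].append((u-1, d))
--
--     # On obtient les distances minimales à partir de la ville 1 (index 0)
--     reachable = can_reach(0, N, L, graph, gas_stations)
--
--     # On compte combien de villes sont atteignables avec le carburant max L
--     count = sum(1 for dist in reachable if dist <= L)
--
--     # Si la ville de départ est atteignable, on la soustrait du comptage
--     return count - 1 if reachable[0] <= L else count
-- ===== SOURCE B (Python) =====
-- def solve(N, M, L, gas_stations, roads):
--     INF = float('inf')
--     graph = [[] for _ in range(N)]
--     for u, v, d in roads:
--         graph[u-1].append((v-1, d))
--         graph[v-1].append((u-1, d))
--     # SPFA-style relaxation: a plain FIFO worklist with re-enqueueing,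
--     # no priority queue and no per-entry fuel keys.
--     dist = [INF] * N
--     dist[0] = 0
--     queue = [0]
--     i = 0
--     while i < len(queue):
--         node = queue[i]
--         i += 1
--         fuel = 0 if gas_stations[node] == 1 else dist[node]
--         for nb, w in graph[node]:
--             nf = fuel + w
--             if nf <= L and nf < dist[nb]:
--                 dist[nb] = nf
--                 queue.append(nb)
--     count = sum(1 for d0 in dist if d0 <= L)
--     return count - 1 if dist[0] <= L else count
-- ===== Notes on version B (the rewrite author's own statement) =====
-- stated objective: alternative
-- what changed: The heap-based Dijkstra of can_reach (priority queue of (fuel,node) keys, popped in fuel order) is replaced by an SPFA/Bellman-Ford-style relaxation: a plain FIFO worklist of node ids with re-enqueueing, reading the effective fuel from the current dist array instead of from heap keys; graph building and the final counting are unchanged.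
-- outside the precondition, e.g. on solve(3, 2, 5, [0, 0, 0], [(1, 2, 10), (2, 3, -1)]): A returns 0, B returns 0; on solve(2, 0, 10, [74, 0, 1], [(2, -1, 2)]): A returns 1, B returns 1; on solve(3, 1, 4, [1, 0], [(1, -1, 2)]): A returns 1, B returns 1
import Mathlib
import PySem

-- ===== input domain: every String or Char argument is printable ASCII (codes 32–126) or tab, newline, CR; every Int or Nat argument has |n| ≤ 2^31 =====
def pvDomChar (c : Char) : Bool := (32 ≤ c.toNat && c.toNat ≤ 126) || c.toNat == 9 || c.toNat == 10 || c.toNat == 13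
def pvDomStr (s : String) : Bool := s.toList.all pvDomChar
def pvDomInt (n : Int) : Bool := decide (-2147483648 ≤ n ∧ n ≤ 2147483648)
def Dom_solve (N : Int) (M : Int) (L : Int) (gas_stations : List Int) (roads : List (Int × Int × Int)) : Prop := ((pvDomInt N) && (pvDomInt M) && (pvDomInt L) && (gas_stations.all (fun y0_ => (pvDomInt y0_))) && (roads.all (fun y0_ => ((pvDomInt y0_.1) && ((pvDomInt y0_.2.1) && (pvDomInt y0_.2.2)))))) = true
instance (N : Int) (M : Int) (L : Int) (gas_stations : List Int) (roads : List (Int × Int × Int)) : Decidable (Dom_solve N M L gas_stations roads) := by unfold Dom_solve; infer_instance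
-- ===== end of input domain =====

-- B replaces can_reach's heap-based Dijkstra by an SPFA/FIFO relaxation with re-enqueueing
-- (no priority queue, effective fuel read from dist); same graph building and counting (alternative, not faster).


-- ===== PORT A =====
-- shared helpers (identical Python lines in A and B): float('inf') is modelled by `none`;
-- list indexing xs[i] / xs[i] = v is PySem.List.pyGetD / pySetD (Python's negative-index wraparound)
def pvLtInf (x : Int) (o : Option Int) : Bool :=
  match o with
  | none => true
  | some y => decide (x < y)

def pvLeL (o : Option Int) (L : Int) : Bool :=
  match o with
  | none => false
  | some x => decide (x ≤ L)

-- the graph-building loop (identical in A and B): graph[u-1].append((v-1,d)); graph[v-1].append((u-1,d))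
def pvBuildGraph (N : Int) (roads : List (Int × Int × Int)) : List (List (Int × Int)) :=
  roads.foldl (fun g r =>
      let g1 := PySem.List.pySetD g (r.1 - 1) (PySem.List.pyGetD g (r.1 - 1) [] ++ [(r.2.1 - 1, r.2.2)])
      PySem.List.pySetD g1 (r.2.1 - 1) (PySem.List.pyGetD g1 (r.2.1 - 1) [] ++ [(r.1 - 1, r.2.2)]))
    (List.replicate N.toNat [])

-- heapq.heappop: remove and return a minimal (fuel, node) pair (lexicographic order on int pairs)
def pvLexLe (a b : Int × Int) : Bool := decide (a.1 < b.1) || (decide (a.1 = b.1) && decide (a.2 ≤ b.2))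

def pvHeapPop (top : Int × Int) (rest : List (Int × Int)) : (Int × Int) × List (Int × Int) :=
  let m := rest.foldl (fun m y => if pvLexLe m y then m else y) top
  (m, (top :: rest).erase m)

-- A's inner for-loop over graph[node]: relax with the popped fuel key, heappush on improvement
def pvRelaxA (L fu : Int) (ns : List (Int × Int)) (st : List (Option Int) × List (Int × Int)) :
    List (Option Int) × List (Int × Int) :=
  ns.foldl (fun st e =>
    let nf := fu + e.2
    if nf ≤ L ∧ pvLtInf nf (PySem.List.pyGetD st.1 e.1 none) then
      (PySem.List.pySetD st.1 e.1 (some nf), st.2 ++ [(nf, e.1)])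
    else st) st

-- A's while pq: loop (fuel only makes the recursion total; it is provably never exhausted inside Pre_)
def pvLoopA (gs : List Int) (g : List (List (Int × Int))) (L : Int) :
    Nat → List (Option Int) → List (Int × Int) → List (Option Int)
  | 0, dist, _ => dist
  | _ + 1, dist, [] => dist
  | fuel + 1, dist, top :: rest =>
    let p := pvHeapPop top rest
    let fu := if PySem.List.pyGetD gs p.1.2 0 = 1 then 0 else p.1.1
    let st := pvRelaxA L fu (PySem.List.pyGetD g p.1.2 []) (dist, p.2)
    pvLoopA gs g L fuel st.1 st.2

def can_reach (start N fuel_max : Int) (graph : List (List (Int × Int))) (gas_stations : List Int) :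
    List (Option Int) :=
  let dist := PySem.List.pySetD (List.replicate N.toNat (none : Option Int)) start (some 0)
  pvLoopA gas_stations graph fuel_max (N.toNat * (fuel_max.toNat + 2) + 2) dist [(0, start)]

def solve (N : Int) (M : Int) (L : Int) (gas_stations : List Int) (roads : List (Int × Int × Int)) : Int :=
  let graph := pvBuildGraph N roads
  let reachable := can_reach 0 N L graph gas_stations
  let count : Int := (reachable.countP (fun od => pvLeL od L) : Nat)
  if pvLeL (PySem.List.pyGetD reachable 0 none) L then count - 1 else count

-- ===== PORT B =====
-- B's inner for-loop: relax with the effective fuel (an Option: inf + w would never pass nf <= L)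
def pvRelaxB (L : Int) (fu : Option Int) (ns : List (Int × Int)) (st : List (Option Int) × List Int) :
    List (Option Int) × List Int :=
  match fu with
  | none => st
  | some f =>
    ns.foldl (fun st e =>
      let nf := f + e.2
      if nf ≤ L ∧ pvLtInf nf (PySem.List.pyGetD st.1 e.1 none) then
        (PySem.List.pySetD st.1 e.1 (some nf), st.2 ++ [e.1])
      else st) st

-- B's FIFO worklist walk (queue of node ids, re-enqueueing on every improvement)
def pvLoopB (gs : List Int) (g : List (List (Int × Int))) (L : Int) :
    Nat → List (Option Int) → List Int → List (Option Int)
  | 0, dist, _ => dist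
  | _ + 1, dist, [] => dist
  | fuel + 1, dist, node :: rest =>
    let fu : Option Int := if PySem.List.pyGetD gs node 0 = 1 then some 0
      else PySem.List.pyGetD dist node none
    let st := pvRelaxB L fu (PySem.List.pyGetD g node []) (dist, rest)
    pvLoopB gs g L fuel st.1 st.2

def solve_alt (N : Int) (M : Int) (L : Int) (gas_stations : List Int) (roads : List (Int × Int × Int)) : Int :=
  let graph := pvBuildGraph N roads
  let dist0 := PySem.List.pySetD (List.replicate N.toNat (none : Option Int)) 0 (some 0)
  let dist := pvLoopB gas_stations graph L (N.toNat * (L.toNat + 2) + 2) dist0 [0]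
  let count : Int := (dist.countP (fun od => pvLeL od L) : Nat)
  if pvLeL (PySem.List.pyGetD dist 0 none) L then count - 1 else count

-- ===== PRECONDITION & SPEC =====
-- the natural contest domain: nonnegative road lengths, endpoints indexable by Python (with
-- wraparound), gas list long enough for every endpoint cell
def pvPreMain (N : Int) (gas_stations : List Int) (roads : List (Int × Int × Int)) : Prop :=
  1 ≤ N ∧ 1 ≤ (gas_stations.length : Int) ∧
  (∀ r ∈ roads, 1 - N ≤ r.1 ∧ r.1 ≤ N ∧ r.1 ≤ (gas_stations.length : Int) ∧
    1 - N ≤ r.2.1 ∧ r.2.1 ≤ N ∧ r.2.1 ≤ (gas_stations.length : Int) ∧ 0 ≤ r.2.2) ∧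
  ((∀ r ∈ roads, 1 ≤ r.1 ∧ 1 ≤ r.2.1) ∨ N = (gas_stations.length : Int))

-- or: no road touches city 1 at all (also through wraparound), so the start is isolated: both
-- programs stop after one pop and agree whatever the weights or the gas list are
def pvPreIsolated (N : Int) (gas_stations : List Int) (roads : List (Int × Int × Int)) : Prop :=
  1 ≤ N ∧ 1 ≤ (gas_stations.length : Int) ∧
  (∀ r ∈ roads, 1 - N ≤ r.1 ∧ r.1 ≤ N ∧ 1 - N ≤ r.2.1 ∧ r.2.1 ≤ N ∧
    r.1 ≠ 1 ∧ r.1 ≠ 1 - N ∧ r.2.1 ≠ 1 ∧ r.2.1 ≠ 1 - N)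

-- Pre_ excludes (a) inputs where A raises (N ≤ 0, empty gas_stations, an IndexError on a road
-- endpoint or on a popped node's gas_stations cell when the list is shorter than N); (b) NEGATIVE
-- road lengths, the problem's malformed inputs: roads are bidirectional, so any negative road that
-- the search reaches is a negative cycle on which A's while-loop DIVERGES (never returns) — on the
-- excluded negative instances where the negative road is never reached and A does return, B returns
-- the very same value (see the cites), but 'A terminates' there is exactly reachability under the
-- evolving fuel, not a closed-form condition on the input, so all negative lengths outside the
-- isolated-start case are excluded; and (c) when a road endpoint is ≤ 0 (Python's negative-index
-- wraparound) and city 1 is not isolated, it requires len(gas_stations) = N, because otherwise the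
-- wrapped node aliases a different gas_stations cell and the result depends on traversal order — a
-- defensible-corner accident of list indexing (again both programs happen to agree on the cites).
def Pre_solve (N : Int) (M : Int) (L : Int) (gas_stations : List Int) (roads : List (Int × Int × Int)) : Prop :=
  pvPreMain N gas_stations roads ∨ pvPreIsolated N gas_stations roads
instance (N : Int) (M : Int) (L : Int) (gas_stations : List Int) (roads : List (Int × Int × Int)) :
    Decidable (Pre_solve N M L gas_stations roads) := by
  unfold Pre_solve pvPreMain pvPreIsolated; infer_instance

def pvWitness_solve : Int × Int × Int × List Int × (List (Int × Int × Int)) :=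
  (3, 2, 5, [0, 1, 0], [(1, 2, 3), (2, 3, 4)])

def Spec_solve (N : Int) (M : Int) (L : Int) (gas_stations : List Int) (roads : List (Int × Int × Int)) (out : Int) : Prop := out = solve_alt N M L gas_stations roads
instance (N : Int) (M : Int) (L : Int) (gas_stations : List Int) (roads : List (Int × Int × Int)) (out : Int) : Decidable (Spec_solve N M L gas_stations roads out) := by unfold Spec_solve; infer_instance

-- ===== CLAIM (what is proved, stated in full; the proofs are below) =====
def Claim_equal_solve : Prop := ∀ (N : Int) (M : Int) (L : Int) (gas_stations : List Int) (roads : List (Int × Int × Int)), Dom_solve N M L gas_stations roads → Pre_solve N M L gas_stations roads → Spec_solve N M L gas_stations roads (solve N M L gas_stations roads)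

-- ===== LEMMAS AND PROOFS =====

-- the cell behind a (possibly negative, Python-style) node id
def pvIdx (N x : Int) : Nat := (if x < 0 then x + N else x).toNat

lemma pvIdx_lt {N x : Int} (h1 : -N ≤ x) (h2 : x < N) : pvIdx N x < N.toNat := by
  unfold pvIdx; split <;> omega

lemma pvPyGetD_eq {α : Type} (xs : List α) (d : α) (N x : Int) (hlen : (xs.length : Int) = N)
    (h1 : -N ≤ x) (h2 : x < N) : PySem.List.pyGetD xs x d = xs.getD (pvIdx N x) d := by
  have hidx : PySem.List.pyIdx? xs.length x = some (pvIdx N x) := by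
    unfold PySem.List.pyIdx? pvIdx
    by_cases hx : 0 ≤ x
    · rw [if_pos hx, if_pos (by omega), if_neg (by omega)]
    · rw [if_neg hx, if_pos (by omega), if_pos (by omega)]
      congr 1
      omega
  unfold PySem.List.pyGetD PySem.List.pyGet?
  rw [hidx]
  simp only [Option.bind_some]
  exact (List.getD_eq_getElem?_getD ..).symm

lemma pvPySetD_eq {α : Type} (xs : List α) (v : α) (N x : Int) (hlen : (xs.length : Int) = N)
    (h1 : -N ≤ x) (h2 : x < N) : PySem.List.pySetD xs x v = xs.set (pvIdx N x) v := by
  have hidx : PySem.List.pyIdx? xs.length x = some (pvIdx N x) := by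
    unfold PySem.List.pyIdx? pvIdx
    by_cases hx : 0 ≤ x
    · rw [if_pos hx, if_pos (by omega), if_neg (by omega)]
    · rw [if_neg hx, if_pos (by omega), if_pos (by omega)]
      congr 1
      omega
  unfold PySem.List.pySetD PySem.List.pySet?
  rw [hidx]
  rfl

-- `none` plays float('inf'); pvOLE a b: every finite value of b is beaten by a finite value of a
def pvOLE (a b : Option Int) : Prop := ∀ c, b = some c → ∃ c', a = some c' ∧ c' ≤ c

lemma pvOLE_refl (a : Option Int) : pvOLE a a := fun c h => ⟨c, h, le_refl c⟩

lemma pvOLE_trans {a b c : Option Int} (h1 : pvOLE a b) (h2 : pvOLE b c) : pvOLE a c := by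
  intro x hx
  obtain ⟨y, hy, hyx⟩ := h2 x hx
  obtain ⟨z, hz, hzy⟩ := h1 y hy
  exact ⟨z, hz, le_trans hzy hyx⟩

-- one relaxation pass only improves distances (pointwise, length preserved)
def pvStepD (d d' : List (Option Int)) : Prop :=
  d'.length = d.length ∧ ∀ i : Nat, pvOLE (d'.getD i none) (d.getD i none)

lemma pvStepD_refl (d : List (Option Int)) : pvStepD d d := ⟨rfl, fun _ => pvOLE_refl _⟩

lemma pvStepD_trans {d1 d2 d3 : List (Option Int)} (h1 : pvStepD d1 d2) (h2 : pvStepD d2 d3) :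
    pvStepD d1 d3 := ⟨h2.1.trans h1.1, fun i => pvOLE_trans (h2.2 i) (h1.2 i)⟩

lemma pvGetD_set_self' {α : Type} {d : List α} {i : Nat} (dflt v : α) (h : i < d.length) :
    (d.set i v).getD i dflt = v := by
  rw [List.getD_eq_getElem?_getD, List.getElem?_set_self h]; rfl

lemma pvGetD_set_ne' {α : Type} {d : List α} {i j : Nat} (dflt v : α) (h : i ≠ j) :
    (d.set i v).getD j dflt = d.getD j dflt := by
  rw [List.getD_eq_getElem?_getD, List.getElem?_set_ne h, ← List.getD_eq_getElem?_getD]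

lemma pvGetD_set_self {d : List (Option Int)} {i : Nat} (v : Option Int) (h : i < d.length) :
    (d.set i v).getD i none = v := pvGetD_set_self' none v h

lemma pvGetD_set_ne {d : List (Option Int)} {i j : Nat} (v : Option Int) (h : i ≠ j) :
    (d.set i v).getD j none = d.getD j none := pvGetD_set_ne' none v h

lemma pvStepD_set {d : List (Option Int)} {i : Nat} {v : Int}
    (h : pvLtInf v (d.getD i none) = true) : pvStepD d (d.set i (some v)) := by
  refine ⟨List.length_set .., fun j => ?_⟩
  by_cases hij : i = j
  · subst hij
    by_cases hl : i < d.length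
    · rw [pvGetD_set_self _ hl]
      intro c hc
      rw [hc] at h
      exact ⟨v, rfl, le_of_lt (by simpa [pvLtInf] using h)⟩
    · rw [List.set_eq_of_length_le (le_of_not_gt hl)]; exact pvOLE_refl _
  · rw [pvGetD_set_ne _ hij]; exact pvOLE_refl _

-- termination measure: each improvement strictly shrinks pvWt at one index
def pvWt (L : Int) (o : Option Int) : Nat :=
  match o with
  | none => L.toNat + 2
  | some c => c.toNat + 1

def pvPhi (L : Int) (d : List (Option Int)) : Nat := (d.map (pvWt L)).sum

lemma pvPhi_set (L : Int) (d : List (Option Int)) : ∀ (i : Nat) (v : Option Int), i < d.length →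
    pvPhi L (d.set i v) + pvWt L (d.getD i none) = pvPhi L d + pvWt L v := by
  induction d with
  | nil => intro i v h; simp at h
  | cons a d ih =>
    intro i v h
    cases i with
    | zero => simp [pvPhi]; omega
    | succ n =>
      have := ih n v (by simpa using h)
      simp only [List.set_cons_succ, pvPhi, List.map_cons, List.sum_cons, List.getD_cons_succ]
      simp only [pvPhi] at this
      omega

-- graph well-formedness produced by pvBuildGraph under Pre_: each stored id is in [-N, N) and its
-- gas_stations lookup (Python wraparound) agrees with the lookup at its cell
def pvGood (N : Int) (gs : List Int) (g : List (List (Int × Int))) : Prop :=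
  (g.length : Int) = N ∧ ∀ l ∈ g, ∀ e ∈ l, -N ≤ (e : Int × Int).1 ∧ e.1 < N ∧ 0 ≤ e.2 ∧
    PySem.List.pyGetD gs e.1 0 = gs.getD (pvIdx N e.1) 0

lemma pvRow_mem {g : List (List (Int × Int))} {i : Nat} (h : i < g.length) : g.getD i [] ∈ g := by
  rw [List.getD_eq_getElem _ _ h]; exact List.getElem_mem h

lemma pvRow_good {N : Int} {gs : List Int} {g : List (List (Int × Int))} (hg : pvGood N gs g)
    (i : Nat) : ∀ e ∈ g.getD i [], -N ≤ (e : Int × Int).1 ∧ e.1 < N ∧ 0 ≤ e.2 ∧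
      PySem.List.pyGetD gs e.1 0 = gs.getD (pvIdx N e.1) 0 := by
  intro e he
  by_cases hi : i < g.length
  · exact hg.2 _ (pvRow_mem hi) e he
  · rw [List.getD_eq_default _ _ (le_of_not_gt hi)] at he
    cases he

lemma pvGood_addEdge {N : Int} {gs : List Int} {g : List (List (Int × Int))} (hg : pvGood N gs g)
    {a b w : Int} (ha0 : -N ≤ a) (haN : a < N) (hb0 : -N ≤ b) (hbN : b < N) (hw : 0 ≤ w)
    (hbg : PySem.List.pyGetD gs b 0 = gs.getD (pvIdx N b) 0) :
    pvGood N gs (PySem.List.pySetD g a (PySem.List.pyGetD g a [] ++ [(b, w)])) := by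
  rw [pvPySetD_eq g _ N a hg.1 ha0 haN, pvPyGetD_eq g [] N a hg.1 ha0 haN]
  have hglen := hg.1
  have hlt : pvIdx N a < g.length := by
    have := pvIdx_lt ha0 haN
    omega
  refine ⟨by simp [hg.1], ?_⟩
  intro l hl e he
  rcases List.mem_or_eq_of_mem_set hl with h | h
  · exact hg.2 l h e he
  · subst h
    rcases List.mem_append.1 he with h | h
    · exact hg.2 _ (pvRow_mem hlt) e h
    · simp only [List.mem_singleton] at h
      subst h
      exact ⟨hb0, hbN, hw, hbg⟩

lemma pvBuild_aux {N : Int} {gs : List Int} : ∀ (rs : List (Int × Int × Int)) (g : List (List (Int × Int))),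
    pvGood N gs g →
    (∀ r ∈ rs, (1 - N ≤ r.1 ∧ r.1 ≤ N ∧ 1 - N ≤ r.2.1 ∧ r.2.1 ≤ N ∧ 0 ≤ r.2.2) ∧
      PySem.List.pyGetD gs (r.1 - 1) 0 = gs.getD (pvIdx N (r.1 - 1)) 0 ∧
      PySem.List.pyGetD gs (r.2.1 - 1) 0 = gs.getD (pvIdx N (r.2.1 - 1)) 0) →
    pvGood N gs (rs.foldl (fun g r =>
      let g1 := PySem.List.pySetD g (r.1 - 1) (PySem.List.pyGetD g (r.1 - 1) [] ++ [(r.2.1 - 1, r.2.2)])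
      PySem.List.pySetD g1 (r.2.1 - 1) (PySem.List.pyGetD g1 (r.2.1 - 1) [] ++ [(r.1 - 1, r.2.2)])) g) := by
  intro rs
  induction rs with
  | nil => intro g hg _; exact hg
  | cons r rs ih =>
    intro g hg h
    obtain ⟨⟨hb1, hb2, hb3, hb4, hb5⟩, hg1, hg2⟩ := h r (List.mem_cons_self ..)
    rw [List.foldl_cons]
    refine ih _ ?_ (fun x hx => h x (List.mem_cons_of_mem _ hx))
    exact pvGood_addEdge
      (pvGood_addEdge hg (by omega) (by omega) (by omega) (by omega) (by omega) hg2)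
      (by omega) (by omega) (by omega) (by omega) (by omega) hg1

lemma pvBuildGraph_good {N : Int} {gs : List Int} (hN : 1 ≤ N) (roads : List (Int × Int × Int))
    (hroads : ∀ r ∈ roads, (1 - N ≤ r.1 ∧ r.1 ≤ N ∧ 1 - N ≤ r.2.1 ∧ r.2.1 ≤ N ∧ 0 ≤ r.2.2) ∧
      PySem.List.pyGetD gs (r.1 - 1) 0 = gs.getD (pvIdx N (r.1 - 1)) 0 ∧
      PySem.List.pyGetD gs (r.2.1 - 1) 0 = gs.getD (pvIdx N (r.2.1 - 1)) 0) :
    pvGood N gs (pvBuildGraph N roads) := by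
  unfold pvBuildGraph
  refine pvBuild_aux roads _ ⟨by simp only [List.length_replicate]; omega, ?_⟩ hroads
  intro l hl e he
  rw [List.eq_of_mem_replicate hl] at he
  cases he

-- the effective fuel at a cell: 0 at a gas station, else the accumulated fuel
def pvEffC (gs : List Int) (i : Nat) (c : Int) : Int := if gs.getD i 0 = 1 then 0 else c

lemma pvEffC_mono (gs : List Int) (i : Nat) {c c' : Int} (h : c ≤ c') :
    pvEffC gs i c ≤ pvEffC gs i c' := by
  unfold pvEffC; split
  · exact le_refl 0
  · exact h

-- derivable (cell, cost) facts: exactly the updates either algorithm can ever make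
inductive pvReach (g : List (List (Int × Int))) (gs : List Int) (L N : Int) : Nat → Int → Prop
  | start : pvReach g gs L N 0 0
  | step {i : Nat} {c : Int} {e : Int × Int} : pvReach g gs L N i c → e ∈ g.getD i [] →
      pvEffC gs i c + e.2 ≤ L → pvReach g gs L N (pvIdx N e.1) (pvEffC gs i c + e.2)

def pvSound (g : List (List (Int × Int))) (gs : List Int) (L N : Int)
    (d : List (Option Int)) : Prop :=
  ∀ i : Nat, ∀ c, d.getD i none = some c → pvReach g gs L N i c ∧ 0 ≤ c

def pvRelaxedAt (g : List (List (Int × Int))) (gs : List Int) (L N : Int)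
    (d : List (Option Int)) (i : Nat) : Prop :=
  ∀ e ∈ g.getD i [], ∀ cu, d.getD i none = some cu →
    pvEffC gs i cu + (e : Int × Int).2 ≤ L →
    ∃ cv, d.getD (pvIdx N (e : Int × Int).1) none = some cv ∧ cv ≤ pvEffC gs i cu + e.2

lemma pvRelaxedAt_mono {g : List (List (Int × Int))} {gs : List Int} {L N : Int}
    {d d' : List (Option Int)} {i : Nat} (hs : pvStepD d d')
    (he : d'.getD i none = d.getD i none) (h : pvRelaxedAt g gs L N d i) :
    pvRelaxedAt g gs L N d' i := by
  intro e hem cu hcu hb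
  obtain ⟨cv, hcv, hle⟩ := h e hem cu (by rw [← he]; exact hcu) hb
  obtain ⟨cv', hcv', hle'⟩ := hs.2 (pvIdx N e.1) cv hcv
  exact ⟨cv', hcv', le_trans hle' hle⟩

-- the two inner relaxation loops, generically (mk builds the worklist entry: a keyed pair for A, the node for B)
def pvRelaxG {γ : Type} (mk : Int → Int → γ) (L fu : Int) (ns : List (Int × Int))
    (st : List (Option Int) × List γ) : List (Option Int) × List γ :=
  ns.foldl (fun st e =>
    let nf := fu + e.2
    if nf ≤ L ∧ pvLtInf nf (PySem.List.pyGetD st.1 e.1 none) then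
      (PySem.List.pySetD st.1 e.1 (some nf), st.2 ++ [mk nf e.1])
    else st) st

lemma pvRelaxA_eq (L fu : Int) (ns : List (Int × Int)) (st : List (Option Int) × List (Int × Int)) :
    pvRelaxA L fu ns st = pvRelaxG Prod.mk L fu ns st := rfl

lemma pvRelaxB_eq (L f : Int) (ns : List (Int × Int)) (st : List (Option Int) × List Int) :
    pvRelaxB L (some f) ns st = pvRelaxG (fun _ v => v) L f ns st := rfl

lemma pvRelaxG_cons {γ : Type} (mk : Int → Int → γ) (L fu : Int) (e : Int × Int)
    (ns : List (Int × Int)) (dist : List (Option Int)) (pq : List γ) (N : Int)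
    (hlen : (dist.length : Int) = N) (h1 : -N ≤ e.1) (h2 : e.1 < N) :
    pvRelaxG mk L fu (e :: ns) (dist, pq) =
      pvRelaxG mk L fu ns
        (if fu + e.2 ≤ L ∧ pvLtInf (fu + e.2) (dist.getD (pvIdx N e.1) none) then
          (dist.set (pvIdx N e.1) (some (fu + e.2)), pq ++ [mk (fu + e.2) e.1])
        else (dist, pq)) := by
  show pvRelaxG mk L fu ns
      (if fu + e.2 ≤ L ∧ pvLtInf (fu + e.2) (PySem.List.pyGetD dist e.1 none) then
        (PySem.List.pySetD dist e.1 (some (fu + e.2)), pq ++ [mk (fu + e.2) e.1])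
      else (dist, pq)) = _
  rw [pvPyGetD_eq dist none N e.1 hlen h1 h2, pvPySetD_eq dist (some (fu + e.2)) N e.1 hlen h1 h2]

lemma pvRelaxG_stepD {γ : Type} (mk : Int → Int → γ) (L fu : Int) (N : Int) :
    ∀ (ns : List (Int × Int)) (dist : List (Option Int)) (pq : List γ),
      (dist.length : Int) = N → (∀ e ∈ ns, -N ≤ (e : Int × Int).1 ∧ e.1 < N) →
      pvStepD dist (pvRelaxG mk L fu ns (dist, pq)).1 := by
  intro ns
  induction ns with
  | nil => intro dist pq _ _; exact pvStepD_refl dist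
  | cons e ns ih =>
    intro dist pq hlen hns
    have he := hns e (List.mem_cons_self ..)
    have hnst := fun e' he' => hns e' (List.mem_cons_of_mem _ he')
    rw [pvRelaxG_cons mk L fu e ns dist pq N hlen he.1 he.2]
    by_cases hc : fu + e.2 ≤ L ∧ pvLtInf (fu + e.2) (dist.getD (pvIdx N e.1) none)
    · rw [if_pos hc]
      exact pvStepD_trans (pvStepD_set hc.2) (ih _ _ (by simp [hlen]) hnst)
    · rw [if_neg hc]; exact ih _ _ hlen hnst

lemma pvRelaxG_mem {γ : Type} (mk : Int → Int → γ) (L fu : Int) (N : Int) :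
    ∀ (ns : List (Int × Int)) (dist : List (Option Int)) (pq : List γ),
      (dist.length : Int) = N → (∀ e ∈ ns, -N ≤ (e : Int × Int).1 ∧ e.1 < N) →
      ∀ x ∈ pq, x ∈ (pvRelaxG mk L fu ns (dist, pq)).2 := by
  intro ns
  induction ns with
  | nil => intro dist pq _ _ x hx; exact hx
  | cons e ns ih =>
    intro dist pq hlen hns x hx
    have he := hns e (List.mem_cons_self ..)
    have hnst := fun e' he' => hns e' (List.mem_cons_of_mem _ he')
    rw [pvRelaxG_cons mk L fu e ns dist pq N hlen he.1 he.2]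
    by_cases hc : fu + e.2 ≤ L ∧ pvLtInf (fu + e.2) (dist.getD (pvIdx N e.1) none)
    · rw [if_pos hc]; exact ih _ _ (by simp [hlen]) hnst x (List.mem_append_left _ hx)
    · rw [if_neg hc]; exact ih _ _ hlen hnst x hx

lemma pvRelaxG_new {γ : Type} (mk : Int → Int → γ) (L fu : Int) (N : Int) :
    ∀ (ns : List (Int × Int)) (dist : List (Option Int)) (pq : List γ),
      (dist.length : Int) = N → (∀ e ∈ ns, -N ≤ (e : Int × Int).1 ∧ e.1 < N) →
      ∀ x ∈ (pvRelaxG mk L fu ns (dist, pq)).2,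
        x ∈ pq ∨ ∃ e ∈ ns, x = mk (fu + (e : Int × Int).2) e.1 ∧ fu + e.2 ≤ L ∧
          ∃ c, (pvRelaxG mk L fu ns (dist, pq)).1.getD (pvIdx N e.1) none = some c ∧ c ≤ fu + e.2 := by
  intro ns
  induction ns with
  | nil => intro dist pq _ _ x hx; exact Or.inl hx
  | cons e ns ih =>
    intro dist pq hlen hns x hx
    have he := hns e (List.mem_cons_self ..)
    have hnst := fun e' he' => hns e' (List.mem_cons_of_mem _ he')
    rw [pvRelaxG_cons mk L fu e ns dist pq N hlen he.1 he.2] at hx ⊢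
    by_cases hc : fu + e.2 ≤ L ∧ pvLtInf (fu + e.2) (dist.getD (pvIdx N e.1) none)
    · rw [if_pos hc] at hx ⊢
      rcases ih _ _ (by simp [hlen]) hnst x hx with h | ⟨e', hm, hx', hL, c, hcd, hcle⟩
      · rcases List.mem_append.1 h with h | h
        · exact Or.inl h
        · simp only [List.mem_singleton] at h
          right
          refine ⟨e, List.mem_cons_self .., h, hc.1, ?_⟩
          have hl : pvIdx N e.1 < dist.length := by
            have := pvIdx_lt he.1 he.2
            omega
          have hset : (dist.set (pvIdx N e.1) (some (fu + e.2))).getD (pvIdx N e.1) none =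
              some (fu + e.2) := pvGetD_set_self _ hl
          obtain ⟨c, hcd, hcle⟩ := (pvRelaxG_stepD mk L fu N ns _ _
            (by simp [hlen]) hnst).2 (pvIdx N e.1) (fu + e.2) hset
          exact ⟨c, hcd, hcle⟩
      · exact Or.inr ⟨e', List.mem_cons_of_mem _ hm, hx', hL, c, hcd, hcle⟩
    · rw [if_neg hc] at hx ⊢
      rcases ih _ _ hlen hnst x hx with h | ⟨e', hm, hx', hL, c, hcd, hcle⟩
      · exact Or.inl h
      · exact Or.inr ⟨e', List.mem_cons_of_mem _ hm, hx', hL, c, hcd, hcle⟩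

lemma pvRelaxG_values {γ : Type} (mk : Int → Int → γ) (L fu : Int) (N : Int) :
    ∀ (ns : List (Int × Int)) (dist : List (Option Int)) (pq : List γ),
      (dist.length : Int) = N → (∀ e ∈ ns, -N ≤ (e : Int × Int).1 ∧ e.1 < N) →
      ∀ (i : Nat) (c : Int), (pvRelaxG mk L fu ns (dist, pq)).1.getD i none = some c →
      dist.getD i none = some c ∨
        ∃ e ∈ ns, pvIdx N (e : Int × Int).1 = i ∧ c = fu + e.2 ∧ c ≤ L := by
  intro ns
  induction ns with
  | nil => intro dist pq _ _ i c h; exact Or.inl h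
  | cons e ns ih =>
    intro dist pq hlen hns i c h
    have he := hns e (List.mem_cons_self ..)
    have hnst := fun e' he' => hns e' (List.mem_cons_of_mem _ he')
    rw [pvRelaxG_cons mk L fu e ns dist pq N hlen he.1 he.2] at h
    by_cases hc : fu + e.2 ≤ L ∧ pvLtInf (fu + e.2) (dist.getD (pvIdx N e.1) none)
    · rw [if_pos hc] at h
      rcases ih _ _ (by simp [hlen]) hnst i c h with h' | ⟨e', hm, hi, hc', hcl⟩
      · by_cases hij : pvIdx N e.1 = i
        · subst hij
          have hl : pvIdx N e.1 < dist.length := by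
            have := pvIdx_lt he.1 he.2
            omega
          rw [pvGetD_set_self _ hl] at h'
          injection h' with h'
          exact Or.inr ⟨e, List.mem_cons_self .., rfl, h'.symm, by rw [← h']; exact hc.1⟩
        · rw [pvGetD_set_ne _ hij] at h'; exact Or.inl h'
      · exact Or.inr ⟨e', List.mem_cons_of_mem _ hm, hi, hc', hcl⟩
    · rw [if_neg hc] at h
      rcases ih _ _ hlen hnst i c h with h' | ⟨e', hm, hi, hc', hcl⟩
      · exact Or.inl h'
      · exact Or.inr ⟨e', List.mem_cons_of_mem _ hm, hi, hc', hcl⟩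

lemma pvRelaxG_relaxed {γ : Type} (mk : Int → Int → γ) (L fu : Int) (N : Int) :
    ∀ (ns : List (Int × Int)) (dist : List (Option Int)) (pq : List γ),
      (dist.length : Int) = N → (∀ e ∈ ns, -N ≤ (e : Int × Int).1 ∧ e.1 < N) →
      ∀ e ∈ ns, fu + (e : Int × Int).2 ≤ L →
      ∃ c, (pvRelaxG mk L fu ns (dist, pq)).1.getD (pvIdx N e.1) none = some c ∧ c ≤ fu + e.2 := by
  intro ns
  induction ns with
  | nil => intro dist pq _ _ e hm; cases hm
  | cons e0 ns ih =>
    intro dist pq hlen hns e hm hL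
    have he0 := hns e0 (List.mem_cons_self ..)
    have hnst := fun e' he' => hns e' (List.mem_cons_of_mem _ he')
    rw [pvRelaxG_cons mk L fu e0 ns dist pq N hlen he0.1 he0.2]
    rcases List.mem_cons.1 hm with heq | hm'
    · subst heq
      by_cases hc : fu + e.2 ≤ L ∧ pvLtInf (fu + e.2) (dist.getD (pvIdx N e.1) none)
      · rw [if_pos hc]
        have hl : pvIdx N e.1 < dist.length := by
          have := pvIdx_lt he0.1 he0.2
          omega
        have hset : (dist.set (pvIdx N e.1) (some (fu + e.2))).getD (pvIdx N e.1) none =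
            some (fu + e.2) := pvGetD_set_self _ hl
        obtain ⟨c, h1, h2⟩ := (pvRelaxG_stepD mk L fu N ns _ _
          (by simp [hlen]) hnst).2 (pvIdx N e.1) (fu + e.2) hset
        exact ⟨c, h1, h2⟩
      · rw [if_neg hc]
        cases hd : dist.getD (pvIdx N e.1) none with
        | none => exact absurd ⟨hL, by rw [hd]; rfl⟩ hc
        | some c0 =>
          have hc0 : c0 ≤ fu + e.2 := by
            by_contra hlt
            exact hc ⟨hL, by rw [hd]; simp [pvLtInf]; omega⟩
          obtain ⟨c, h1, h2⟩ := (pvRelaxG_stepD mk L fu N ns _ _ hlen hnst).2 (pvIdx N e.1) c0 hd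
          exact ⟨c, h1, le_trans h2 hc0⟩
    · by_cases hc : fu + e0.2 ≤ L ∧ pvLtInf (fu + e0.2) (dist.getD (pvIdx N e0.1) none)
      · rw [if_pos hc]
        exact ih (dist.set (pvIdx N e0.1) (some (fu + e0.2))) (pq ++ [mk (fu + e0.2) e0.1])
          (by simp [hlen]) hnst e hm' hL
      · rw [if_neg hc]
        exact ih _ _ hlen hnst e hm' hL

lemma pvRelaxG_track {γ : Type} (mk : Int → Int → γ) (L fu : Int) (N : Int) :
    ∀ (ns : List (Int × Int)) (dist : List (Option Int)) (pq : List γ),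
      (dist.length : Int) = N → (∀ e ∈ ns, -N ≤ (e : Int × Int).1 ∧ e.1 < N) →
      ∀ i : Nat,
        (pvRelaxG mk L fu ns (dist, pq)).1.getD i none = dist.getD i none ∨
        ∃ c, ∃ e ∈ ns, (pvRelaxG mk L fu ns (dist, pq)).1.getD i none = some c ∧
          pvIdx N (e : Int × Int).1 = i ∧ mk c e.1 ∈ (pvRelaxG mk L fu ns (dist, pq)).2 := by
  intro ns
  induction ns with
  | nil => intro dist pq _ _ i; exact Or.inl rfl
  | cons e ns ih =>
    intro dist pq hlen hns i
    have he := hns e (List.mem_cons_self ..)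
    have hnst := fun e' he' => hns e' (List.mem_cons_of_mem _ he')
    rw [pvRelaxG_cons mk L fu e ns dist pq N hlen he.1 he.2]
    by_cases hc : fu + e.2 ≤ L ∧ pvLtInf (fu + e.2) (dist.getD (pvIdx N e.1) none)
    · rw [if_pos hc]
      rcases ih (dist.set (pvIdx N e.1) (some (fu + e.2))) (pq ++ [mk (fu + e.2) e.1])
          (by simp [hlen]) hnst i with h | ⟨c, e', hm, hcd, hi, hmem⟩
      · by_cases hij : pvIdx N e.1 = i
        · subst hij
          by_cases hl : pvIdx N e.1 < dist.length
          · right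
            rw [h, pvGetD_set_self _ hl]
            refine ⟨fu + e.2, e, List.mem_cons_self .., rfl, rfl, ?_⟩
            exact pvRelaxG_mem mk L fu N ns _ _ (by simp [hlen]) hnst _
              (List.mem_append_right _ (by simp))
          · rw [List.set_eq_of_length_le (le_of_not_gt hl)] at h ⊢
            exact Or.inl h
        · rw [pvGetD_set_ne _ hij] at h; exact Or.inl h
      · exact Or.inr ⟨c, e', List.mem_cons_of_mem _ hm, hcd, hi, hmem⟩
    · rw [if_neg hc]
      rcases ih _ _ hlen hnst i with h | ⟨c, e', hm, hcd, hi, hmem⟩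
      · exact Or.inl h
      · exact Or.inr ⟨c, e', List.mem_cons_of_mem _ hm, hcd, hi, hmem⟩

lemma pvRelaxG_phi {γ : Type} (mk : Int → Int → γ) (L fu : Int) (N : Int) (hfu : 0 ≤ fu) :
    ∀ (ns : List (Int × Int)) (dist : List (Option Int)) (pq : List γ),
      (dist.length : Int) = N →
      (∀ e ∈ ns, (-N ≤ (e : Int × Int).1 ∧ e.1 < N) ∧ 0 ≤ e.2) →
      (pvRelaxG mk L fu ns (dist, pq)).2.length + pvPhi L (pvRelaxG mk L fu ns (dist, pq)).1 ≤
        pq.length + pvPhi L dist := by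
  intro ns
  induction ns with
  | nil => intro dist pq _ _; exact le_refl _
  | cons e ns ih =>
    intro dist pq hlen h
    have he := h e (List.mem_cons_self ..)
    have htail := fun e' he' => h e' (List.mem_cons_of_mem _ he')
    rw [pvRelaxG_cons mk L fu e ns dist pq N hlen he.1.1 he.1.2]
    by_cases hc : fu + e.2 ≤ L ∧ pvLtInf (fu + e.2) (dist.getD (pvIdx N e.1) none)
    · rw [if_pos hc]
      have step := ih (dist.set (pvIdx N e.1) (some (fu + e.2))) (pq ++ [mk (fu + e.2) e.1])
        (by simp [hlen]) htail
      refine le_trans step ?_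
      have hl : pvIdx N e.1 < dist.length := by
        have := pvIdx_lt he.1.1 he.1.2
        omega
      have hw0 := he.2
      have hps := pvPhi_set L dist (pvIdx N e.1) (some (fu + e.2)) hl
      have hwlt : pvWt L (some (fu + e.2)) + 1 ≤ pvWt L (dist.getD (pvIdx N e.1) none) := by
        cases hd : dist.getD (pvIdx N e.1) none with
        | none =>
          have h1 := hc.1
          simp only [pvWt]
          omega
        | some c0 =>
          have := hc.2
          rw [hd] at this
          simp only [pvLtInf, decide_eq_true_eq] at this
          simp only [pvWt]
          omega
      simp only [List.length_append, List.length_cons, List.length_nil]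
      omega
    · rw [if_neg hc]; exact ih _ _ hlen htail

-- the popped pair is a member of the old heap
lemma pvFoldlMin_mem : ∀ (l : List (Int × Int)) (a : Int × Int),
    l.foldl (fun m y => if pvLexLe m y then m else y) a ∈ a :: l := by
  intro l
  induction l with
  | nil => intro a; simp
  | cons y l ih =>
    intro a
    rw [List.foldl_cons]
    rcases List.mem_cons.1 (ih (if pvLexLe a y then a else y)) with h | h
    · rw [h]
      split
      · exact List.mem_cons_self ..
      · exact List.mem_cons_of_mem _ (List.mem_cons_self ..)
    · exact List.mem_cons_of_mem _ (List.mem_cons_of_mem _ h)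

-- A's loop invariant: sound dist, justified heap entries whose key dominates their cell's dist,
-- and every finite dist cell either has an exact-key pending entry or is fully relaxed
def pvInvA (g : List (List (Int × Int))) (gs : List Int) (L N : Int)
    (dist : List (Option Int)) (pq : List (Int × Int)) : Prop :=
  (dist.length : Int) = N ∧ pvSound g gs L N dist ∧
  (∀ x ∈ pq, -N ≤ (x : Int × Int).2 ∧ x.2 < N ∧ 0 ≤ x.1 ∧
    PySem.List.pyGetD gs x.2 0 = gs.getD (pvIdx N x.2) 0 ∧
    pvReach g gs L N (pvIdx N x.2) x.1 ∧
    ∃ c, dist.getD (pvIdx N x.2) none = some c ∧ c ≤ x.1) ∧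
  (∀ i : Nat, ∀ cu, dist.getD i none = some cu →
    ((∃ id : Int, pvIdx N id = i ∧ (cu, id) ∈ pq) ∨ pvRelaxedAt g gs L N dist i))

lemma pvLoopA_spec (g : List (List (Int × Int))) (gs : List Int) (L N : Int)
    (hg : pvGood N gs g) :
    ∀ (fuel : Nat) (dist : List (Option Int)) (pq : List (Int × Int)),
      pvInvA g gs L N dist pq → pq.length + pvPhi L dist ≤ fuel →
      pvStepD dist (pvLoopA gs g L fuel dist pq) ∧
      pvSound g gs L N (pvLoopA gs g L fuel dist pq) ∧
      (∀ i : Nat, pvRelaxedAt g gs L N (pvLoopA gs g L fuel dist pq) i) := by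
  intro fuel
  induction fuel with
  | zero =>
    intro dist pq hinv hb
    have hpq : pq = [] := by
      cases pq with
      | nil => rfl
      | cons a l => simp [List.length_cons] at hb
    subst hpq
    refine ⟨pvStepD_refl _, hinv.2.1, ?_⟩
    intro i e he cu hcu hle
    rcases hinv.2.2.2 i cu hcu with ⟨id, _, h⟩ | h
    · cases h
    · exact h e he cu hcu hle
  | succ fuel ih =>
    intro dist pq hinv hb
    cases pq with
    | nil =>
      refine ⟨pvStepD_refl _, hinv.2.1, ?_⟩
      intro i e he cu hcu hle
      rcases hinv.2.2.2 i cu hcu with ⟨id, _, h⟩ | h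
      · cases h
      · exact h e he cu hcu hle
    | cons top rest =>
      obtain ⟨hlen, hsound, hpq, hH⟩ := hinv
      have hmMem : (pvHeapPop top rest).1 ∈ top :: rest := pvFoldlMin_mem rest top
      obtain ⟨hm20, hm2N, hm10, hmGC, hmR, cm, hcm, hcmle⟩ := hpq _ hmMem
      -- the popped node's cell and effective fuel
      have hfueff : (if PySem.List.pyGetD gs (pvHeapPop top rest).1.2 0 = 1 then 0
          else (pvHeapPop top rest).1.1) =
          pvEffC gs (pvIdx N (pvHeapPop top rest).1.2) (pvHeapPop top rest).1.1 := by
        rw [hmGC]; rfl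
      have hfu0 : 0 ≤ pvEffC gs (pvIdx N (pvHeapPop top rest).1.2) (pvHeapPop top rest).1.1 := by
        unfold pvEffC; split <;> omega
      have hrowbr : PySem.List.pyGetD g (pvHeapPop top rest).1.2 [] =
          g.getD (pvIdx N (pvHeapPop top rest).1.2) [] :=
        pvPyGetD_eq g [] N _ hg.1 hm20 hm2N
      have hrow : ∀ e ∈ g.getD (pvIdx N (pvHeapPop top rest).1.2) [],
          (-N ≤ (e : Int × Int).1 ∧ e.1 < N ∧ 0 ≤ e.2 ∧
            PySem.List.pyGetD gs e.1 0 = gs.getD (pvIdx N e.1) 0) :=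
        pvRow_good hg _
      have hRJ : ∀ e ∈ g.getD (pvIdx N (pvHeapPop top rest).1.2) [],
          pvEffC gs (pvIdx N (pvHeapPop top rest).1.2) (pvHeapPop top rest).1.1 + (e : Int × Int).2 ≤ L →
          pvReach g gs L N (pvIdx N (e : Int × Int).1)
            (pvEffC gs (pvIdx N (pvHeapPop top rest).1.2) (pvHeapPop top rest).1.1 + e.2) :=
        fun e hvw hL => pvReach.step hmR hvw hL
      have hpq2mem : ∀ x ∈ (pvHeapPop top rest).2, x ∈ top :: rest :=
        fun x hx => List.mem_of_mem_erase hx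
      have hpq2len : (pvHeapPop top rest).2.length = rest.length := by
        show ((top :: rest).erase (pvHeapPop top rest).1).length = rest.length
        rw [List.length_erase_of_mem hmMem]
        simp
      have hns : ∀ e ∈ g.getD (pvIdx N (pvHeapPop top rest).1.2) [],
          -N ≤ (e : Int × Int).1 ∧ e.1 < N := fun e he => ⟨(hrow e he).1, (hrow e he).2.1⟩
      -- the state after the relax pass, in generic form
      have hstG : pvRelaxA L (if PySem.List.pyGetD gs (pvHeapPop top rest).1.2 0 = 1 then 0
            else (pvHeapPop top rest).1.1) (PySem.List.pyGetD g (pvHeapPop top rest).1.2 [])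
            (dist, (pvHeapPop top rest).2) =
          pvRelaxG Prod.mk L (pvEffC gs (pvIdx N (pvHeapPop top rest).1.2) (pvHeapPop top rest).1.1)
            (g.getD (pvIdx N (pvHeapPop top rest).1.2) []) (dist, (pvHeapPop top rest).2) := by
        rw [pvRelaxA_eq, hfueff, hrowbr]
      have hstep : pvStepD dist (pvRelaxA L
          (if PySem.List.pyGetD gs (pvHeapPop top rest).1.2 0 = 1 then 0
            else (pvHeapPop top rest).1.1) (PySem.List.pyGetD g (pvHeapPop top rest).1.2 [])
          (dist, (pvHeapPop top rest).2)).1 := by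
        rw [hstG]; exact pvRelaxG_stepD _ _ _ _ _ _ _ hlen hns
      have hinv' : pvInvA g gs L N
          (pvRelaxA L (if PySem.List.pyGetD gs (pvHeapPop top rest).1.2 0 = 1 then 0
            else (pvHeapPop top rest).1.1) (PySem.List.pyGetD g (pvHeapPop top rest).1.2 [])
            (dist, (pvHeapPop top rest).2)).1
          (pvRelaxA L (if PySem.List.pyGetD gs (pvHeapPop top rest).1.2 0 = 1 then 0
            else (pvHeapPop top rest).1.1) (PySem.List.pyGetD g (pvHeapPop top rest).1.2 [])
            (dist, (pvHeapPop top rest).2)).2 := by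
        rw [hstG]
        refine ⟨by rw [Nat.cast_inj.2 (pvRelaxG_stepD _ _ _ _ _ _ _ hlen hns).1]; exact hlen,
          ?_, ?_, ?_⟩
        · -- soundness
          intro i c hc
          rcases pvRelaxG_values _ _ _ _ _ _ _ hlen hns i c hc with h | ⟨e, hvw, hvi, hcf, hcL⟩
          · exact (hsound i c h).imp id id
          · subst hvi
            exact ⟨hcf ▸ hRJ e hvw (hcf ▸ hcL), by
              have := (hrow e hvw).2.2.1
              omega⟩
        · -- heap entries justified
          intro x hx
          rcases pvRelaxG_new _ _ _ _ _ _ _ hlen hns x hx with h | ⟨e, hvw, hxe, hL, c, hcd, hcle⟩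
          · obtain ⟨h1, h2, h3, h4, h5, c, hc, hcle⟩ := hpq x (hpq2mem x h)
            obtain ⟨c', hc', hcle'⟩ := (pvRelaxG_stepD Prod.mk L
              (pvEffC gs (pvIdx N (pvHeapPop top rest).1.2) (pvHeapPop top rest).1.1) N
              (g.getD (pvIdx N (pvHeapPop top rest).1.2) []) dist (pvHeapPop top rest).2
              hlen hns).2 (pvIdx N x.2) c hc
            exact ⟨h1, h2, h3, h4, h5, c', hc', le_trans hcle' hcle⟩
          · subst hxe
            obtain ⟨hv1, hv2, hv3, hv4⟩ := hrow e hvw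
            exact ⟨hv1, hv2, by omega, hv4, hRJ e hvw hL, c, hcd, hcle⟩
        · -- pending-or-relaxed, per cell
          intro i cu hcu
          rcases pvRelaxG_track Prod.mk L
              (pvEffC gs (pvIdx N (pvHeapPop top rest).1.2) (pvHeapPop top rest).1.1) N
              (g.getD (pvIdx N (pvHeapPop top rest).1.2) []) dist (pvHeapPop top rest).2
              hlen hns i with h | ⟨c, e, hm, hcd, hi, hmem⟩
          · have hcu' : dist.getD i none = some cu := by rw [← h]; exact hcu
            rcases hH i cu hcu' with ⟨id, hidx, hin⟩ | hrel
            · by_cases hxm : ((cu, id) : Int × Int) = (pvHeapPop top rest).1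
              · right
                -- the popped entry carries this cell's exact value: the pass relaxed it
                have hid2 : id = (pvHeapPop top rest).1.2 := by rw [← hxm]
                have hcu2 : cu = (pvHeapPop top rest).1.1 := by rw [← hxm]
                have hcell : pvIdx N (pvHeapPop top rest).1.2 = i := by rw [← hid2]; exact hidx
                intro e he cu' hcu'' hble
                have hcueq : cu' = cu := by
                  rw [hcu] at hcu''; injection hcu'' with h''; exact h''.symm
                subst hcueq
                have heff : pvEffC gs i cu' =
                    pvEffC gs (pvIdx N (pvHeapPop top rest).1.2) (pvHeapPop top rest).1.1 := by
                  rw [hcell, hcu2]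
                rw [heff] at hble ⊢
                have he' : e ∈ g.getD (pvIdx N (pvHeapPop top rest).1.2) [] := by
                  rw [hcell]; exact he
                obtain ⟨cv, h1, h2⟩ := pvRelaxG_relaxed Prod.mk L _ N _ dist
                  (pvHeapPop top rest).2 hlen hns e he' hble
                exact ⟨cv, h1, h2⟩
              · left
                have hin2 : ((cu, id) : Int × Int) ∈ (pvHeapPop top rest).2 :=
                  (List.mem_erase_of_ne hxm).2 hin
                exact ⟨id, hidx, pvRelaxG_mem _ _ _ _ _ _ _ hlen hns _ hin2⟩
            · right
              exact pvRelaxedAt_mono (by rw [hstG] at hstep; exact hstep) h hrel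
          · left
            have hceq : c = cu := Option.some.inj (hcd.symm.trans hcu)
            exact ⟨e.1, hi, hceq ▸ hmem⟩
      have hb' : (pvRelaxA L (if PySem.List.pyGetD gs (pvHeapPop top rest).1.2 0 = 1 then 0
            else (pvHeapPop top rest).1.1) (PySem.List.pyGetD g (pvHeapPop top rest).1.2 [])
            (dist, (pvHeapPop top rest).2)).2.length +
          pvPhi L (pvRelaxA L (if PySem.List.pyGetD gs (pvHeapPop top rest).1.2 0 = 1 then 0
            else (pvHeapPop top rest).1.1) (PySem.List.pyGetD g (pvHeapPop top rest).1.2 [])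
            (dist, (pvHeapPop top rest).2)).1 ≤ fuel := by
        rw [hstG]
        have hphi := pvRelaxG_phi Prod.mk L _ N hfu0 (g.getD (pvIdx N (pvHeapPop top rest).1.2) [])
          dist (pvHeapPop top rest).2 hlen (fun e he => ⟨hns e he, (hrow e he).2.2.1⟩)
        rw [List.length_cons] at hb
        omega
      obtain ⟨s1, s2, s3⟩ := ih _ _ hinv' hb'
      exact ⟨pvStepD_trans hstep s1, s2, s3⟩

-- B's loop invariant: sound dist, queued ids in range with finite cells and consistent gas lookup,
-- and every finite dist cell either has a queued id or is fully relaxed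
def pvInvB (g : List (List (Int × Int))) (gs : List Int) (L N : Int)
    (dist : List (Option Int)) (q : List Int) : Prop :=
  (dist.length : Int) = N ∧ pvSound g gs L N dist ∧
  (∀ u ∈ q, -N ≤ u ∧ u < N ∧ PySem.List.pyGetD gs u 0 = gs.getD (pvIdx N u) 0 ∧
    ∃ c, dist.getD (pvIdx N u) none = some c) ∧
  (∀ i : Nat, ∀ cu, dist.getD i none = some cu →
    ((∃ id : Int, pvIdx N id = i ∧ id ∈ q) ∨ pvRelaxedAt g gs L N dist i))

lemma pvLoopB_spec (g : List (List (Int × Int))) (gs : List Int) (L N : Int)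
    (hg : pvGood N gs g) :
    ∀ (fuel : Nat) (dist : List (Option Int)) (q : List Int),
      pvInvB g gs L N dist q → q.length + pvPhi L dist ≤ fuel →
      pvStepD dist (pvLoopB gs g L fuel dist q) ∧
      pvSound g gs L N (pvLoopB gs g L fuel dist q) ∧
      (∀ i : Nat, pvRelaxedAt g gs L N (pvLoopB gs g L fuel dist q) i) := by
  intro fuel
  induction fuel with
  | zero =>
    intro dist q hinv hb
    have hq : q = [] := by
      cases q with
      | nil => rfl
      | cons a l => simp [List.length_cons] at hb
    subst hq
    refine ⟨pvStepD_refl _, hinv.2.1, ?_⟩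
    intro i e he cu hcu hle
    rcases hinv.2.2.2 i cu hcu with ⟨id, _, h⟩ | h
    · cases h
    · exact h e he cu hcu hle
  | succ fuel ih =>
    intro dist q hinv hb
    cases q with
    | nil =>
      refine ⟨pvStepD_refl _, hinv.2.1, ?_⟩
      intro i e he cu hcu hle
      rcases hinv.2.2.2 i cu hcu with ⟨id, _, h⟩ | h
      · cases h
      · exact h e he cu hcu hle
    | cons node rest =>
      obtain ⟨hlen, hsound, hq, hH⟩ := hinv
      obtain ⟨hn0, hnN, hnGC, cn, hcn⟩ := hq node (List.mem_cons_self ..)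
      obtain ⟨hnR, hcn0⟩ := hsound (pvIdx N node) cn hcn
      have hfus : (if PySem.List.pyGetD gs node 0 = 1 then (some 0 : Option Int)
          else PySem.List.pyGetD dist node none) = some (pvEffC gs (pvIdx N node) cn) := by
        rw [hnGC, pvPyGetD_eq dist none N node hlen hn0 hnN]
        unfold pvEffC
        by_cases hgas : gs.getD (pvIdx N node) 0 = 1
        · rw [if_pos hgas, if_pos hgas]
        · rw [if_neg hgas, if_neg hgas, hcn]
      have hfu0 : 0 ≤ pvEffC gs (pvIdx N node) cn := by unfold pvEffC; split <;> omega
      have hrowbr : PySem.List.pyGetD g node [] = g.getD (pvIdx N node) [] :=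
        pvPyGetD_eq g [] N node hg.1 hn0 hnN
      have hrow : ∀ e ∈ g.getD (pvIdx N node) [],
          (-N ≤ (e : Int × Int).1 ∧ e.1 < N ∧ 0 ≤ e.2 ∧
            PySem.List.pyGetD gs e.1 0 = gs.getD (pvIdx N e.1) 0) :=
        pvRow_good hg _
      have hRJ : ∀ e ∈ g.getD (pvIdx N node) [],
          pvEffC gs (pvIdx N node) cn + (e : Int × Int).2 ≤ L →
          pvReach g gs L N (pvIdx N (e : Int × Int).1) (pvEffC gs (pvIdx N node) cn + e.2) :=
        fun e hvw hL => pvReach.step hnR hvw hL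
      have hns : ∀ e ∈ g.getD (pvIdx N node) [], -N ≤ (e : Int × Int).1 ∧ e.1 < N :=
        fun e he => ⟨(hrow e he).1, (hrow e he).2.1⟩
      have hstG : pvRelaxB L (if PySem.List.pyGetD gs node 0 = 1 then (some 0 : Option Int)
            else PySem.List.pyGetD dist node none) (PySem.List.pyGetD g node []) (dist, rest) =
          pvRelaxG (fun _ v => v) L (pvEffC gs (pvIdx N node) cn)
            (g.getD (pvIdx N node) []) (dist, rest) := by
        rw [hfus, hrowbr, pvRelaxB_eq]
      have hstep : pvStepD dist (pvRelaxB L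
          (if PySem.List.pyGetD gs node 0 = 1 then (some 0 : Option Int)
            else PySem.List.pyGetD dist node none) (PySem.List.pyGetD g node [])
          (dist, rest)).1 := by
        rw [hstG]; exact pvRelaxG_stepD _ _ _ _ _ _ _ hlen hns
      have hinv' : pvInvB g gs L N
          (pvRelaxB L (if PySem.List.pyGetD gs node 0 = 1 then (some 0 : Option Int)
            else PySem.List.pyGetD dist node none) (PySem.List.pyGetD g node []) (dist, rest)).1
          (pvRelaxB L (if PySem.List.pyGetD gs node 0 = 1 then (some 0 : Option Int)
            else PySem.List.pyGetD dist node none) (PySem.List.pyGetD g node []) (dist, rest)).2 := by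
        rw [hstG]
        refine ⟨by rw [Nat.cast_inj.2 (pvRelaxG_stepD _ _ _ _ _ _ _ hlen hns).1]; exact hlen,
          ?_, ?_, ?_⟩
        · intro i c hc
          rcases pvRelaxG_values _ _ _ _ _ _ _ hlen hns i c hc with h | ⟨e, hvw, hvi, hcf, hcL⟩
          · exact (hsound i c h).imp id id
          · subst hvi
            exact ⟨hcf ▸ hRJ e hvw (hcf ▸ hcL), by
              have := (hrow e hvw).2.2.1
              omega⟩
        · intro x hx
          rcases pvRelaxG_new _ _ _ _ _ _ _ hlen hns x hx with h | ⟨e, hvw, hxe, hL, c, hcd, hcle⟩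
          · obtain ⟨h1, h2, h3, c, hc⟩ := hq x (List.mem_cons_of_mem _ h)
            obtain ⟨c', hc', _⟩ := (pvRelaxG_stepD (fun _ v => v) L (pvEffC gs (pvIdx N node) cn)
              N (g.getD (pvIdx N node) []) dist rest hlen hns).2 (pvIdx N x) c hc
            exact ⟨h1, h2, h3, c', hc'⟩
          · subst hxe
            obtain ⟨hv1, hv2, _, hv4⟩ := hrow e hvw
            exact ⟨hv1, hv2, hv4, c, hcd⟩
        · intro i cu hcu
          rcases pvRelaxG_track (fun _ v => v) L (pvEffC gs (pvIdx N node) cn) N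
              (g.getD (pvIdx N node) []) dist rest hlen hns i with h | ⟨c, e, hm, hcd, hi, hmem⟩
          · have hcu' : dist.getD i none = some cu := by rw [← h]; exact hcu
            rcases hH i cu hcu' with ⟨id, hidx, hin⟩ | hrel
            · rcases List.mem_cons.1 hin with hun | hin'
              · subst hun
                by_cases hcell : pvIdx N id = i
                · right
                  -- the dequeued id owns this cell and dist there is unchanged: the pass relaxed it
                  intro e he cu' hcu'' hble
                  have hcueq : cu' = cu := by
                    rw [hcu] at hcu''; injection hcu'' with h''; exact h''.symm
                  subst hcueq
                  have hcucn : cu' = cn := by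
                    rw [hcell] at hcn
                    exact Option.some.inj (hcu'.symm.trans hcn)
                  have heff : pvEffC gs i cu' = pvEffC gs (pvIdx N id) cn := by
                    rw [hcell, hcucn]
                  rw [heff] at hble ⊢
                  have he' : e ∈ g.getD (pvIdx N id) [] := by
                    rw [hcell]; exact he
                  obtain ⟨cv, h1, h2⟩ := pvRelaxG_relaxed (fun _ v => v) L _ N _ dist rest
                    hlen hns e he' hble
                  exact ⟨cv, h1, h2⟩
                · exact absurd hidx hcell
              · left
                exact ⟨id, hidx, pvRelaxG_mem _ _ _ _ _ _ _ hlen hns _ hin'⟩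
            · right
              exact pvRelaxedAt_mono (by rw [hstG] at hstep; exact hstep) h hrel
          · left
            exact ⟨e.1, hi, hmem⟩
      have hb' : (pvRelaxB L (if PySem.List.pyGetD gs node 0 = 1 then (some 0 : Option Int)
            else PySem.List.pyGetD dist node none) (PySem.List.pyGetD g node [])
            (dist, rest)).2.length +
          pvPhi L (pvRelaxB L (if PySem.List.pyGetD gs node 0 = 1 then (some 0 : Option Int)
            else PySem.List.pyGetD dist node none) (PySem.List.pyGetD g node [])
            (dist, rest)).1 ≤ fuel := by
        rw [hstG]
        have hphi := pvRelaxG_phi (fun _ v => v) L _ N hfu0 (g.getD (pvIdx N node) [])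
          dist rest hlen (fun e he => ⟨hns e he, (hrow e he).2.2.1⟩)
        rw [List.length_cons] at hb
        omega
      obtain ⟨s1, s2, s3⟩ := ih _ _ hinv' hb'
      exact ⟨pvStepD_trans hstep s1, s2, s3⟩

-- a fully relaxed table with dist[0] = 0 beats every derivable (cell, cost) fact
lemma pvComplete (g : List (List (Int × Int))) (gs : List Int) (L N : Int)
    (D : List (Option Int)) (h0 : D.getD 0 none = some 0)
    (hrel : ∀ i : Nat, pvRelaxedAt g gs L N D i) :
    ∀ (i : Nat) (c : Int), pvReach g gs L N i c → ∃ c', D.getD i none = some c' ∧ c' ≤ c := by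
  intro i c h
  induction h with
  | start => exact ⟨0, h0, le_refl 0⟩
  | @step i' c' e hR hmem hL ih =>
    obtain ⟨cu, hcu, hcule⟩ := ih
    have heff : pvEffC gs i' cu ≤ pvEffC gs i' c' := pvEffC_mono gs i' hcule
    obtain ⟨cv, hv1, hv2⟩ := hrel i' e hmem cu hcu (by omega)
    exact ⟨cv, hv1, by omega⟩

-- soundness + completeness on both sides force the two final tables to agree
lemma pvDistEq (g : List (List (Int × Int))) (gs : List Int) (L N : Int)
    (DA DB : List (Option Int)) (hl : DA.length = DB.length)
    (hsA : pvSound g gs L N DA) (hsB : pvSound g gs L N DB)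
    (hrA : ∀ i : Nat, pvRelaxedAt g gs L N DA i)
    (hrB : ∀ i : Nat, pvRelaxedAt g gs L N DB i)
    (h0A : DA.getD 0 none = some 0) (h0B : DB.getD 0 none = some 0) : DA = DB := by
  apply List.ext_getElem hl
  intro i h1 h2
  have hgA : DA.getD i none = DA[i] := List.getD_eq_getElem DA none h1
  have hgB : DB.getD i none = DB[i] := List.getD_eq_getElem DB none h2
  cases hA : DA.getD i none with
  | none =>
    cases hB : DB.getD i none with
    | none => rw [← hgA, ← hgB, hA, hB]
    | some b =>
      exfalso
      have hR := (hsB i b hB).1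
      obtain ⟨c', hc', _⟩ := pvComplete g gs L N DA h0A hrA i b hR
      rw [hA] at hc'
      cases hc'
  | some a =>
    cases hB : DB.getD i none with
    | none =>
      exfalso
      have hR := (hsA i a hA).1
      obtain ⟨c', hc', _⟩ := pvComplete g gs L N DB h0B hrB i a hR
      rw [hB] at hc'
      cases hc'
    | some b =>
      have hRA := (hsA i a hA).1
      have hRB := (hsB i b hB).1
      obtain ⟨b', hb', hb'le⟩ := pvComplete g gs L N DB h0B hrB i a hRA
      obtain ⟨a', ha', ha'le⟩ := pvComplete g gs L N DA h0A hrA i b hRB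
      rw [hB] at hb'
      rw [hA] at ha'
      have hb'b : b' = b := Option.some.inj hb'.symm
      have ha'a : a' = a := Option.some.inj ha'.symm
      rw [← hgA, ← hgB, hA, hB]
      exact congrArg some (le_antisymm (by omega) (by omega))

lemma pvRepl_getD (n j : Nat) : (List.replicate n (none : Option Int)).getD j none = none := by
  rw [List.getD_eq_getElem?_getD, List.getElem?_replicate]
  split <;> rfl

-- gas-lookup consistency for the id x under Pre_'s disjunction
lemma pvGC_of_pre (gs : List Int) (N x : Int) (h1 : -N ≤ x) (h2 : x < N)
    (hcase : (0 ≤ x ∧ x < (gs.length : Int)) ∨ (gs.length : Int) = N) :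
    PySem.List.pyGetD gs x 0 = gs.getD (pvIdx N x) 0 := by
  rcases hcase with ⟨hx0, hxl⟩ | heq
  · have hidx : PySem.List.pyIdx? gs.length x = some (pvIdx N x) := by
      unfold PySem.List.pyIdx? pvIdx
      rw [if_pos hx0, if_pos (by omega), if_neg (by omega)]
    unfold PySem.List.pyGetD PySem.List.pyGet?
    rw [hidx]
    simp only [Option.bind_some]
    exact (List.getD_eq_getElem?_getD ..).symm
  · exact pvPyGetD_eq gs 0 N x heq h1 h2

lemma pvIdx_zero (N : Int) : pvIdx N 0 = 0 := by
  unfold pvIdx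
  rw [if_neg (by omega)]
  rfl


lemma pvIdx_ne_zero {N x : Int} (h1 : -N ≤ x) (h2 : x < N) (hx0 : x ≠ 0) (hxN : x ≠ -N) :
    pvIdx N x ≠ 0 := by
  unfold pvIdx; split <;> omega

lemma pvBuildIso_aux {N : Int} (hN : 1 ≤ N) : ∀ (rs : List (Int × Int × Int)) (g : List (List (Int × Int))),
    ((g.length : Int) = N ∧ g.getD 0 [] = []) →
    (∀ r ∈ rs, 1 - N ≤ r.1 ∧ r.1 ≤ N ∧ 1 - N ≤ r.2.1 ∧ r.2.1 ≤ N ∧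
      r.1 ≠ 1 ∧ r.1 ≠ 1 - N ∧ r.2.1 ≠ 1 ∧ r.2.1 ≠ 1 - N) →
    (((rs.foldl (fun g r =>
      let g1 := PySem.List.pySetD g (r.1 - 1) (PySem.List.pyGetD g (r.1 - 1) [] ++ [(r.2.1 - 1, r.2.2)])
      PySem.List.pySetD g1 (r.2.1 - 1) (PySem.List.pyGetD g1 (r.2.1 - 1) [] ++ [(r.1 - 1, r.2.2)])) g).length : Int) = N ∧
    (rs.foldl (fun g r =>
      let g1 := PySem.List.pySetD g (r.1 - 1) (PySem.List.pyGetD g (r.1 - 1) [] ++ [(r.2.1 - 1, r.2.2)])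
      PySem.List.pySetD g1 (r.2.1 - 1) (PySem.List.pyGetD g1 (r.2.1 - 1) [] ++ [(r.1 - 1, r.2.2)])) g).getD 0 [] = []) := by
  intro rs
  induction rs with
  | nil => intro g hg _; exact hg
  | cons r rs ih =>
    intro g hg h
    obtain ⟨b1, b2, b3, b4, b5, b6, b7, b8⟩ := h r (List.mem_cons_self ..)
    rw [List.foldl_cons]
    refine ih _ ?_ (fun x hx => h x (List.mem_cons_of_mem _ hx))
    rw [pvPySetD_eq g _ N (r.1 - 1) hg.1 (by omega) (by omega)]
    have hg1len : (((g.set (pvIdx N (r.1 - 1))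
        (PySem.List.pyGetD g (r.1 - 1) [] ++ [(r.2.1 - 1, r.2.2)])).length : Nat) : Int) = N := by
      rw [List.length_set]; exact hg.1
    rw [pvPySetD_eq _ _ N (r.2.1 - 1) hg1len (by omega) (by omega)]
    constructor
    · simp only [List.length_set]; exact hg.1
    · rw [pvGetD_set_ne' [] _ (pvIdx_ne_zero (by omega) (by omega) (by omega) (by omega)),
        pvGetD_set_ne' [] _ (pvIdx_ne_zero (by omega) (by omega) (by omega) (by omega))]
      exact hg.2

lemma pvBuild_iso {N : Int} (roads : List (Int × Int × Int)) (hN : 1 ≤ N)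
    (h : ∀ r ∈ roads, 1 - N ≤ r.1 ∧ r.1 ≤ N ∧ 1 - N ≤ r.2.1 ∧ r.2.1 ≤ N ∧
      r.1 ≠ 1 ∧ r.1 ≠ 1 - N ∧ r.2.1 ≠ 1 ∧ r.2.1 ≠ 1 - N) :
    PySem.List.pyGetD (pvBuildGraph N roads) 0 [] = [] := by
  have h2 := pvBuildIso_aux hN roads (List.replicate N.toNat [])
    ⟨by simp only [List.length_replicate]; omega, by
      rw [List.getD_eq_getElem?_getD, List.getElem?_replicate]
      split <;> rfl⟩ h
  show PySem.List.pyGetD (roads.foldl _ (List.replicate N.toNat [])) 0 [] = []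
  rw [pvPyGetD_eq _ [] N 0 h2.1 (by omega) (by omega), pvIdx_zero]
  exact h2.2

lemma pvRelaxA_nil (L fu : Int) (st : List (Option Int) × List (Int × Int)) :
    pvRelaxA L fu [] st = st := rfl

lemma pvRelaxB_nil (L : Int) (fu : Option Int) (st : List (Option Int) × List Int) :
    pvRelaxB L fu [] st = st := by
  cases fu <;> rfl

lemma pvLoopA_nil (gs : List Int) (g : List (List (Int × Int))) (L : Int) :
    ∀ (f : Nat) (dist : List (Option Int)), pvLoopA gs g L f dist [] = dist := by
  intro f dist
  cases f <;> rfl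

lemma pvLoopB_nil (gs : List Int) (g : List (List (Int × Int))) (L : Int) :
    ∀ (f : Nat) (dist : List (Option Int)), pvLoopB gs g L f dist [] = dist := by
  intro f dist
  cases f <;> rfl

lemma pvLoopA_iso (gs : List Int) (g : List (List (Int × Int))) (L : Int)
    (hrow : PySem.List.pyGetD g 0 [] = []) (f : Nat) (dist : List (Option Int)) :
    pvLoopA gs g L (f + 1) dist [(0, 0)] = dist := by
  have h1 : pvLoopA gs g L (f + 1) dist [(0, 0)] =
      pvLoopA gs g L f
        (pvRelaxA L (if PySem.List.pyGetD gs 0 0 = 1 then 0 else 0) (PySem.List.pyGetD g 0 [])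
          (dist, [])).1
        (pvRelaxA L (if PySem.List.pyGetD gs 0 0 = 1 then 0 else 0) (PySem.List.pyGetD g 0 [])
          (dist, [])).2 := rfl
  rw [h1, hrow, pvRelaxA_nil]
  exact pvLoopA_nil gs g L f dist

lemma pvLoopB_iso (gs : List Int) (g : List (List (Int × Int))) (L : Int)
    (hrow : PySem.List.pyGetD g 0 [] = []) (f : Nat) (dist : List (Option Int)) :
    pvLoopB gs g L (f + 1) dist [0] = dist := by
  have h1 : pvLoopB gs g L (f + 1) dist [0] =
      pvLoopB gs g L f
        (pvRelaxB L (if PySem.List.pyGetD gs 0 0 = 1 then some 0 else PySem.List.pyGetD dist 0 none)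
          (PySem.List.pyGetD g 0 []) (dist, [])).1
        (pvRelaxB L (if PySem.List.pyGetD gs 0 0 = 1 then some 0 else PySem.List.pyGetD dist 0 none)
          (PySem.List.pyGetD g 0 []) (dist, [])).2 := rfl
  rw [h1, hrow, pvRelaxB_nil]
  exact pvLoopB_nil gs g L f dist

lemma pvIso_case (N M L : Int) (gas : List Int) (roads : List (Int × Int × Int))
    (hpre : pvPreIsolated N gas roads) : solve N M L gas roads = solve_alt N M L gas roads := by
  obtain ⟨hN, hgl, hr⟩ := hpre
  have hrow : PySem.List.pyGetD (pvBuildGraph N roads) 0 [] = [] := pvBuild_iso roads hN hr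
  unfold solve solve_alt can_reach
  simp only []
  have hf : N.toNat * (L.toNat + 2) + 2 = (N.toNat * (L.toNat + 2) + 1) + 1 := rfl
  rw [hf, pvLoopA_iso _ _ _ hrow, pvLoopB_iso _ _ _ hrow]

lemma pvMain_case (N M L : Int) (gas : List Int) (roads : List (Int × Int × Int))
    (hpre : pvPreMain N gas roads) : solve N M L gas roads = solve_alt N M L gas roads := by
  obtain ⟨hN, hgl, hroads, hcase⟩ := hpre
  have hg : pvGood N gas (pvBuildGraph N roads) := by
    refine pvBuildGraph_good hN roads ?_
    intro r hr
    obtain ⟨b1, b2, b3, b4, b5, b6, b7⟩ := hroads r hr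
    refine ⟨⟨by omega, by omega, by omega, by omega, b7⟩, ?_, ?_⟩
    · refine pvGC_of_pre gas N (r.1 - 1) (by omega) (by omega) ?_
      rcases hcase with h | h
      · exact Or.inl ⟨by have := (h r hr).1; omega, by omega⟩
      · exact Or.inr h.symm
    · refine pvGC_of_pre gas N (r.2.1 - 1) (by omega) (by omega) ?_
      rcases hcase with h | h
      · exact Or.inl ⟨by have := (h r hr).2; omega, by omega⟩
      · exact Or.inr h.symm
  have hGC0 : PySem.List.pyGetD gas 0 0 = gas.getD (pvIdx N 0) 0 :=
    pvGC_of_pre gas N 0 (by omega) (by omega) (Or.inl ⟨le_refl 0, by omega⟩)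
  have hreplen : ((List.replicate N.toNat (none : Option Int)).length : Int) = N := by
    simp only [List.length_replicate]; omega
  have hbr0 : PySem.List.pySetD (List.replicate N.toNat (none : Option Int)) 0 (some 0) =
      (List.replicate N.toNat (none : Option Int)).set 0 (some 0) := by
    rw [pvPySetD_eq _ _ N 0 hreplen (by omega) (by omega), pvIdx_zero]
  have hd0len : (((List.replicate N.toNat (none : Option Int)).set 0 (some 0)).length : Int) = N := by
    simp only [List.length_set, List.length_replicate]; omega
  have h00 : ((List.replicate N.toNat (none : Option Int)).set 0 (some 0)).getD 0 none = some 0 :=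
    pvGetD_set_self _ (by simp only [List.length_replicate]; omega)
  have h0j : ∀ j : Nat, j ≠ 0 →
      ((List.replicate N.toNat (none : Option Int)).set 0 (some 0)).getD j none = none := by
    intro j hj
    rw [pvGetD_set_ne _ (Ne.symm hj), pvRepl_getD]
  have hsound0 : pvSound (pvBuildGraph N roads) gas L N
      ((List.replicate N.toNat (none : Option Int)).set 0 (some 0)) := by
    intro i c hc
    by_cases hi : i = 0
    · subst hi
      rw [h00] at hc
      have : c = 0 := (Option.some.inj hc).symm
      subst this
      exact ⟨pvReach.start, le_refl 0⟩
    · rw [h0j _ hi] at hc; cases hc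
  have hinvA : pvInvA (pvBuildGraph N roads) gas L N
      ((List.replicate N.toNat (none : Option Int)).set 0 (some 0)) [(0, 0)] := by
    refine ⟨hd0len, hsound0, ?_, ?_⟩
    · intro x hx
      simp only [List.mem_singleton] at hx
      subst hx
      refine ⟨by omega, by omega, le_refl 0, hGC0, ?_, 0, ?_, le_refl 0⟩
      · rw [pvIdx_zero]; exact pvReach.start
      · rw [pvIdx_zero]; exact h00
    · intro i cu hcu
      by_cases hi : i = 0
      · subst hi
        have hcu0 : cu = 0 := (Option.some.inj (h00.symm.trans hcu)).symm
        exact Or.inl ⟨0, pvIdx_zero N, by rw [hcu0]; simp⟩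
      · rw [h0j _ hi] at hcu; cases hcu
  have hinvB : pvInvB (pvBuildGraph N roads) gas L N
      ((List.replicate N.toNat (none : Option Int)).set 0 (some 0)) [0] := by
    refine ⟨hd0len, hsound0, ?_, ?_⟩
    · intro u hu
      simp only [List.mem_singleton] at hu
      subst hu
      exact ⟨by omega, by omega, hGC0, 0, by rw [pvIdx_zero]; exact h00⟩
    · intro i cu hcu
      by_cases hi : i = 0
      · subst hi
        exact Or.inl ⟨0, pvIdx_zero N, by simp⟩
      · rw [h0j _ hi] at hcu; cases hcu
  have hphi0 : pvPhi L ((List.replicate N.toNat (none : Option Int)).set 0 (some 0)) +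
      pvWt L ((List.replicate N.toNat (none : Option Int)).getD 0 none) =
      pvPhi L (List.replicate N.toNat (none : Option Int)) + pvWt L (some 0) :=
    pvPhi_set L _ 0 _ (by simp only [List.length_replicate]; omega)
  have hphirep : pvPhi L (List.replicate N.toNat (none : Option Int)) = N.toNat * (L.toNat + 2) := by
    simp [pvPhi, List.map_replicate, List.sum_replicate, pvWt, smul_eq_mul]
  have hb : 1 + pvPhi L ((List.replicate N.toNat (none : Option Int)).set 0 (some 0)) ≤
      N.toNat * (L.toNat + 2) + 2 := by
    rw [pvRepl_getD] at hphi0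
    simp only [pvWt] at hphi0
    omega
  obtain ⟨hsA', hsoundA, hrelA⟩ := pvLoopA_spec (pvBuildGraph N roads) gas L N hg
    (N.toNat * (L.toNat + 2) + 2) ((List.replicate N.toNat (none : Option Int)).set 0 (some 0))
    [(0, 0)] hinvA (by simpa using hb)
  obtain ⟨hsB', hsoundB, hrelB⟩ := pvLoopB_spec (pvBuildGraph N roads) gas L N hg
    (N.toNat * (L.toNat + 2) + 2) ((List.replicate N.toNat (none : Option Int)).set 0 (some 0))
    [0] hinvB (by simpa using hb)
  have h0A : (pvLoopA gas (pvBuildGraph N roads) L (N.toNat * (L.toNat + 2) + 2)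
      ((List.replicate N.toNat (none : Option Int)).set 0 (some 0)) [(0, 0)]).getD 0 none =
      some 0 := by
    obtain ⟨c, hc, hcle⟩ := hsA'.2 0 0 h00
    have h0c := hsoundA 0 c hc
    have hc0 : c = 0 := le_antisymm hcle h0c.2
    rw [hc0] at hc; exact hc
  have h0B : (pvLoopB gas (pvBuildGraph N roads) L (N.toNat * (L.toNat + 2) + 2)
      ((List.replicate N.toNat (none : Option Int)).set 0 (some 0)) [0]).getD 0 none =
      some 0 := by
    obtain ⟨c, hc, hcle⟩ := hsB'.2 0 0 h00
    have h0c := hsoundB 0 c hc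
    have hc0 : c = 0 := le_antisymm hcle h0c.2
    rw [hc0] at hc; exact hc
  have hEq : pvLoopA gas (pvBuildGraph N roads) L (N.toNat * (L.toNat + 2) + 2)
      ((List.replicate N.toNat (none : Option Int)).set 0 (some 0)) [(0, 0)] =
      pvLoopB gas (pvBuildGraph N roads) L (N.toNat * (L.toNat + 2) + 2)
      ((List.replicate N.toNat (none : Option Int)).set 0 (some 0)) [0] :=
    pvDistEq (pvBuildGraph N roads) gas L N _ _ (hsA'.1.trans hsB'.1.symm)
      hsoundA hsoundB hrelA hrelB h0A h0B
  have hEq' : pvLoopA gas (pvBuildGraph N roads) L (N.toNat * (L.toNat + 2) + 2)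
      (PySem.List.pySetD (List.replicate N.toNat (none : Option Int)) 0 (some 0)) [(0, 0)] =
      pvLoopB gas (pvBuildGraph N roads) L (N.toNat * (L.toNat + 2) + 2)
      (PySem.List.pySetD (List.replicate N.toNat (none : Option Int)) 0 (some 0)) [0] := by
    rw [hbr0]; exact hEq
  show solve N M L gas roads = solve_alt N M L gas roads
  unfold solve solve_alt can_reach
  simp only []
  rw [hEq']

-- ===== VERDICT (by name: the statement is the Claim_ definition above) =====
theorem solve_spec : Claim_equal_solve := by
  unfold Claim_equal_solve
  intro N M L gas roads _ hpre
  unfold Spec_solve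
  rcases hpre with h | h
  · exact pvMain_case N M L gas roads h
  · exact pvIso_case N M L gas roads h
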